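-- pv_equiv track=rewrite | github.com/zhimaAi/ChatClaw | .cursor/skills/i18n-check/scripts/format_frontend.py | to_nested_format
-- ===== SOURCE A (Python) =====
-- def to_nested_format(flat_obj):
--     lines = ['export default {']
--
--     nested = {}
--     for key, value in flat_obj.items():
--         parts = key.split('.')
--         current = nested
--         for i, part in enumerate(parts[:-1]):
--             if part not in current:
--                 current[part] = {}
--             current = current[part]
--         current[parts[-1]] = value
--
--     def print_object(obj, indent=1):
--         indent_str = '  ' * indent
--         for key, value in obj.items():
--             if isinstance(value, dict):
--                 lines.append(f'{indent_str}{key}: {{')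
--                 print_object(value, indent + 1)
--                 lines.append(f'{indent_str}}},')
--             else:
--                 # Re-escape for TS string literal; do NOT encode/decode (would corrupt non-ASCII)
--                 escaped_value = value.replace('\\', '\\\\').replace('"', '\\"')
--                 lines.append(f'{indent_str}{key}: "{escaped_value}",')
--
--     print_object(nested)
--     lines.append('}')
--     lines.append('')
--     return '\n'.join(lines)
-- ===== SOURCE B (Python) =====
-- def to_nested_format(flat_obj):
--     lines = ['export default {']
--
--     nested = {}
--     for key, value in flat_obj.items():
--         parts = key.split('.')
--         current = nested
--         for i, part in enumerate(parts[:-1]):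
--             if part not in current:
--                 current[part] = {}
--             current = current[part]
--         current[parts[-1]] = value
--
--     # Iterative, explicit-stack depth-first emission instead of A's recursive printer.
--     stack = [(iter(nested.items()), 1)]
--     while stack:
--         it, indent = stack[-1]
--         entry = next(it, None)
--         if entry is None:
--             stack.pop()
--             if stack:
--                 lines.append('  ' * (indent - 1) + '},')
--             continue
--         key, value = entry
--         indent_str = '  ' * indent
--         if isinstance(value, dict):
--             lines.append(f'{indent_str}{key}: {{')
--             stack.append((iter(value.items()), indent + 1))
--         else:
--             escaped_value = value.replace('\\', '\\\\').replace('"', '\\"')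
--             lines.append(f'{indent_str}{key}: "{escaped_value}",')
--
--     lines.append('}')
--     lines.append('')
--     return '\n'.join(lines)
-- ===== Notes on version B (the rewrite author's own statement) =====
-- stated objective: alternative
-- what changed: The recursive closure-based print_object is replaced by an explicit iterative stack of (iterator, indent) frames that emits opening, scalar and closing lines in depth-first order; the nested-dict building loop is kept, and Pre_ excludes exactly the inputs where that loop raises TypeError (a key that is a dot-prefix of a later key).
import Mathlib
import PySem

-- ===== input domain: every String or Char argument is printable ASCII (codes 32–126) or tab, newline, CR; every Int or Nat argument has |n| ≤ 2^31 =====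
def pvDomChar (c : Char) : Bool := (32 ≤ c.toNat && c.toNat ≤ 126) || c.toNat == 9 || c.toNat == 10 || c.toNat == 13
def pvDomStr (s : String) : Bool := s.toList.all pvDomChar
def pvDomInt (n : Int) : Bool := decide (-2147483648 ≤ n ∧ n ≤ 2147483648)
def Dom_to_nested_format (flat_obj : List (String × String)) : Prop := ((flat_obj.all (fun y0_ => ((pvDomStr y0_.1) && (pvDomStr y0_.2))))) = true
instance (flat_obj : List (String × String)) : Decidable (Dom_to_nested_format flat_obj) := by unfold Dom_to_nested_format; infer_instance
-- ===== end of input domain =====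

-- B replaces A's recursive printer with an explicit iterative stack-based traversal; the
-- nested-structure building phase is the same code in both Pythons, so both ports share it.

-- ===== SHARED HELPERS (the building phase, identical in Source A and Source B) =====

-- the nested dict: string keys mapped, in insertion order, to either a string or a sub-dict
mutual
inductive NVal where
  | vs : String → NVal
  | vo : NObj → NVal
deriving DecidableEq, Repr
inductive NObj where
  | nil : NObj
  | cons : String → NVal → NObj → NObj
deriving DecidableEq, Repr
end

-- dict lookup (keys are unique by construction)
def lookupO : NObj → String → Option NVal
  | .nil, _ => none
  | .cons k v r, key => if k = key then some v else lookupO r key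

-- dict assignment: overwrite in place, else append at the end (Python dict insertion order)
def setO : NObj → String → NVal → NObj
  | .nil, key, v => .cons key v .nil
  | .cons k w r, key, v => if k = key then .cons k v r else .cons k w (setO r key v)

-- the inner `for part in parts[:-1]` walk + final assignment, as recursion on parts;
-- none = Python's TypeError (a prefix of the path is already bound to a string)
def setIn (obj : NObj) (parts : List String) (value : String) : Option NObj :=
  match parts with
  | [] => some obj            -- unreachable: str.split never returns []
  | [last] => some (setO obj last (.vs value))
  | p :: rest =>
      match lookupO obj p with
      | some (.vs _) => none
      | some (.vo child) => (setIn child rest value).map (fun c => setO obj p (.vo c))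
      | none => (setIn NObj.nil rest value).map (fun c => setO obj p (.vo c))

-- the `for key, value in flat_obj.items()` building loop; split? with sep "." is always some
def buildNested (flat_obj : List (String × String)) : Option NObj :=
  flat_obj.foldl (fun acc kv => acc.bind (fun o => setIn o ((PySem.Str.split? kv.1 ".").getD []) kv.2)) (some NObj.nil)

-- '  ' * indent
def indentStr : Nat → String
  | 0 => ""
  | n + 1 => indentStr n ++ "  "

-- value.replace('\\', '\\\\').replace('"', '\\"')
def escapeVal (s : String) : String :=
  PySem.Str.replace (PySem.Str.replace s "\\" "\\\\") "\"" "\\\""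

-- ===== PORT A =====

-- the recursive print_object, returning the lines it appends
def printRec : NObj → Nat → List String
  | .nil, _ => []
  | .cons k (.vo o) r, ind =>
      (indentStr ind ++ k ++ ": {") ::
        (printRec o (ind + 1) ++ ((indentStr ind ++ "},") :: printRec r ind))
  | .cons k (.vs s) r, ind =>
      (indentStr ind ++ k ++ ": \"" ++ escapeVal s ++ "\",") :: printRec r ind

def to_nested_format (flat_obj : List (String × String)) : String :=
  match buildNested flat_obj with
  | none => ""      -- Python raises TypeError here; excluded by Pre_
  | some nested =>
      PySem.Str.join "\n" ("export default {" :: (printRec nested 1 ++ ["}", ""]))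

-- ===== PORT B =====

-- size measure for the stack loop's termination
def sizeO : NObj → Nat
  | .nil => 0
  | .cons _ (.vs _) r => 1 + sizeO r
  | .cons _ (.vo o) r => 2 + sizeO o + sizeO r

-- Source B's `while stack:` loop; a frame is (remaining items of the dict being iterated, indent)
def iterLoop : List (NObj × Nat) → List String → List String
  | [], acc => acc
  | (.nil, ind) :: stack, acc =>
      iterLoop stack (if stack.isEmpty then acc else acc ++ [indentStr (ind - 1) ++ "},"])
  | (.cons k (.vo o) r, ind) :: stack, acc =>
      iterLoop ((o, ind + 1) :: (r, ind) :: stack) (acc ++ [indentStr ind ++ k ++ ": {"])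
  | (.cons k (.vs s) r, ind) :: stack, acc =>
      iterLoop ((r, ind) :: stack) (acc ++ [indentStr ind ++ k ++ ": \"" ++ escapeVal s ++ "\","])
termination_by stack _ => (stack.map (fun f => sizeO f.1 + 1)).sum
decreasing_by all_goals (simp [sizeO]; try omega)

def to_nested_format_alt (flat_obj : List (String × String)) : String :=
  match buildNested flat_obj with
  | none => ""      -- same building loop as A: raises TypeError in Python; excluded by Pre_
  | some nested =>
      PySem.Str.join "\n" (iterLoop [(nested, 1)] ["export default {"] ++ ["}", ""])

-- ===== PRECONDITION & SPEC =====
-- Pre_ excludes exactly the inputs on which A raises TypeError: a key that is a strict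
-- dot-path prefix of a later key makes the building loop index/assign into a string.
def Pre_to_nested_format (flat_obj : List (String × String)) : Prop :=
  List.Pairwise (fun p q => ¬ (PySem.Str.startswith q.1 (p.1 ++ ".") = true)) flat_obj
instance (flat_obj : List (String × String)) : Decidable (Pre_to_nested_format flat_obj) := by
  unfold Pre_to_nested_format; infer_instance

def pvWitness_to_nested_format : (List (String × String)) :=
  [("common.ok", "Done"), ("common.cancel", "Cancel \"now\""), ("title", "Chat\\Claw")]

def Spec_to_nested_format (flat_obj : List (String × String)) (out : String) : Prop := out = to_nested_format_alt flat_obj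
instance (flat_obj : List (String × String)) (out : String) : Decidable (Spec_to_nested_format flat_obj out) := by unfold Spec_to_nested_format; infer_instance

-- ===== CLAIM (what is proved, stated in full; the proofs are below) =====
def Claim_equal_to_nested_format : Prop := ∀ (flat_obj : List (String × String)), Dom_to_nested_format flat_obj → Pre_to_nested_format flat_obj → Spec_to_nested_format flat_obj (to_nested_format flat_obj)

-- ===== LEMMAS AND PROOFS =====

-- the stack loop processes the top frame exactly as the recursive printer does, then
-- emits the frame's closing line (unless it is the bottom frame) and continues
theorem iterLoop_spec (n : Nat) : ∀ (o : NObj), sizeO o ≤ n → ∀ (i : Nat) (rest : List (NObj × Nat)) (acc : List String),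
    iterLoop ((o, i) :: rest) acc
      = iterLoop rest (if rest.isEmpty then acc ++ printRec o i
                       else acc ++ printRec o i ++ [indentStr (i - 1) ++ "},"]) := by
  induction n with
  | zero =>
    intro o h i rest acc
    cases o with
    | nil => rw [iterLoop]; cases rest <;> simp [printRec]
    | cons k v r => cases v <;> simp [sizeO] at h
  | succ n ih =>
    intro o h i rest acc
    cases o with
    | nil => rw [iterLoop]; cases rest <;> simp [printRec]
    | cons k v r =>
      cases v with
      | vs s =>
        rw [iterLoop, ih r (by simp [sizeO] at h; omega) i rest]
        cases rest <;> simp [printRec]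
      | vo c =>
        rw [iterLoop,
            ih c (by simp [sizeO] at h; omega) (i + 1) ((r, i) :: rest),
            ih r (by simp [sizeO] at h; omega) i rest]
        cases rest <;> simp [printRec]

theorem iterLoop_single (o : NObj) (i : Nat) (acc : List String) :
    iterLoop [(o, i)] acc = acc ++ printRec o i := by
  rw [iterLoop_spec (sizeO o) o le_rfl]
  simp [iterLoop]

-- ===== VERDICT (by name: the statement is the Claim_ definition above) =====
theorem to_nested_format_spec : Claim_equal_to_nested_format := by
  intro flat_obj _ _
  unfold Spec_to_nested_format to_nested_format to_nested_format_alt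
  cases buildNested flat_obj with
  | none => rfl
  | some nested => simp [iterLoop_single]
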